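-- pv_equiv track=rewrite | github.com/pypi-data/pypi-mirror-376 | packages/snowpark-connect/snowpark_connect-0.27.0.tar.gz/snowpark_connect-0.27.0/src/snowflake/snowpark_connect/utils/identifiers.py | split_fully_qualified_spark_name
-- ===== SOURCE A (Python) =====
-- def split_fully_qualified_spark_name(qualified_name: str | None) -> list[str]:
--     """
--     Splits a fully qualified Spark identifier into its component parts.
--
--     A dot (.) is used as a delimiter only when occurring outside a quoted segment.
--     A quoted segment is wrapped in single backticks. Inside a quoted segment,
--     any occurrence of two consecutive backticks is treated as a literal backtick.
--     After splitting, any token that was quoted is unescaped: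
--       - The external backticks are removed.
--       - Any double backticks are replaced with a single backtick.
--
--     Examples:
--       "a.b.c"
--          -> ["a", "b", "c"]
--
--       "`a.somethinh.b`.b.c"
--          -> ["a.somethinh.b", "b", "c"]
--
--       "`a$b`.`b#c`.d.e.f.g.h.as"
--          -> ["a$b", "b#c", "d", "e", "f", "g", "h", "as"]
--
--       "`a.b.c`"
--          -> ["a.b.c"]
--
--       "`a``b``c.d.e`"
--          -> ["a`b`c", "d", "e"]
--
--       "asdfasd" -> ["asdfasd"]
--     """
--     if qualified_name in ("``", "", None):
--         # corner case where empty string is denoted by an empty string. We cannot have emtpy string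
--         # in fully qualified name.
--         return [""]
--     assert isinstance(qualified_name, str), qualified_name
--
--     parts = []
--     token_chars = []
--     in_quotes = False
--     i = 0
--     n = len(qualified_name)
--
--     while i < n:
--         ch = qualified_name[i]
--         if ch == "`":
--             # If current char is a backtick:
--             if i + 1 < n and qualified_name[i + 1] == "`":
--                 # If next char is also a backtick, unescape the backtick character by replacing `` with `.
--                 token_chars.append("`")
--                 i += 2
--                 continue
--             else:
--                 # Toggle the in_quotes state and skip backtick in the token.
--                 in_quotes = not in_quotes
--                 i += 1
--         elif ch == "." and not in_quotes:
--             # Dot encountered outside of quotes: finish the current token.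
--             parts.append("".join(token_chars))
--             token_chars = []
--             i += 1
--         else:
--             token_chars.append(ch)
--             i += 1
--
--     if token_chars:
--         parts.append("".join(token_chars))
--
--     return parts
-- ===== SOURCE B (Python) =====
-- def split_fully_qualified_spark_name(qualified_name):
--     if qualified_name in ("``", "", None):
--         # corner case: empty name denoted by [""]
--         return [""]
--     parts = []
--     tok = []          # list of string fragments for the current token
--     in_quotes = False
--     i = 0
--     n = len(qualified_name)
--     while i < n:
--         if qualified_name[i] == "`":
--             # consume the whole maximal run of backticks at once:
--             # each pair is one literal backtick, an odd leftover toggles quoting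
--             j = i
--             while j < n and qualified_name[j] == "`":
--                 j += 1
--             k = j - i
--             tok.append("`" * (k // 2))
--             if k % 2:
--                 in_quotes = not in_quotes
--             i = j
--         else:
--             # consume the whole backtick-free chunk at once
--             j = qualified_name.find("`", i)
--             if j == -1:
--                 j = n
--             chunk = qualified_name[i:j]
--             if in_quotes:
--                 tok.append(chunk)
--             else:
--                 pieces = chunk.split(".")
--                 tok.append(pieces[0])
--                 for p in pieces[1:]:
--                     parts.append("".join(tok))
--                     tok = [p]
--             i = j
--     last = "".join(tok)
--     if last:
--         parts.append(last)
--     return parts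
-- ===== Notes on version B (the rewrite author's own statement) =====
-- stated objective: faster
-- what changed: A advances one character (or one backtick pair) per iteration of a single state machine; B is a block scanner that consumes each maximal backtick run in one inner loop (emitting half as many literal backticks and toggling quoting on an odd run) and each backtick-free chunk in one find/slice step, splitting unquoted chunks on dots with str.split.
import Mathlib
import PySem

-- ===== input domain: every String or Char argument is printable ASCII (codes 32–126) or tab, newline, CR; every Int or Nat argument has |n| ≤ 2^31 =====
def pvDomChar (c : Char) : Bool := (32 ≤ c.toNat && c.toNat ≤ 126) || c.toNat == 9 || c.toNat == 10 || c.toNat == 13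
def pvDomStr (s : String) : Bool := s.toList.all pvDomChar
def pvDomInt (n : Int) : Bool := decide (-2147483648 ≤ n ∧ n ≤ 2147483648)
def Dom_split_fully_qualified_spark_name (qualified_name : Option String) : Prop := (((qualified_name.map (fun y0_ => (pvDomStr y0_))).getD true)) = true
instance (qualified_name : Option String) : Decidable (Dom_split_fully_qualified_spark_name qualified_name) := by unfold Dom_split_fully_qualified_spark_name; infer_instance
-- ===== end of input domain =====

-- B replaces A's per-character state machine by a block scanner that consumes whole
-- backtick runs and whole backtick-free chunks at once (objective: faster, in a timing run's measurement).


-- ===== PORT A =====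
-- A's while loop over index i, with the two-char lookahead for "``";
-- state: remaining chars, token_chars, in_quotes, parts.
def aLoop : List Char → List Char → Bool → List String → List String
  | [], tok, _, parts => if tok = [] then parts else parts ++ [String.ofList tok]
  | '`' :: '`' :: rest, tok, inq, parts => aLoop rest (tok ++ ['`']) inq parts
  | '`' :: rest, tok, inq, parts => aLoop rest tok (!inq) parts
  | c :: rest, tok, inq, parts =>
      if c = '.' ∧ inq = false then aLoop rest [] inq (parts ++ [String.ofList tok])
      else aLoop rest (tok ++ [c]) inq parts

def split_fully_qualified_spark_name (qualified_name : Option String) : List String :=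
  match qualified_name with
  | none => [""]
  | some s => if s = "``" ∨ s = "" then [""] else aLoop s.toList [] false []

-- ===== PORT B =====
-- B's inner "while j<n and s[j]=='`'" run consumption: (run length, remainder)
def bTicks : List Char → Nat × List Char
  | '`' :: rest => ((bTicks rest).1 + 1, (bTicks rest).2)
  | cs => (0, cs)

-- B's "j = s.find('`', i); chunk = s[i:j]": (backtick-free chunk, remainder)
def bChunk : List Char → List Char × List Char
  | [] => ([], [])
  | c :: rest => if c = '`' then ([], c :: rest) else
      (c :: (bChunk rest).1, (bChunk rest).2)

-- exact port of Python str.split('.') on a string with no other separators involved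
def dotSplit : List Char → List (List Char)
  | [] => [[]]
  | c :: rest =>
      if c = '.' then [] :: dotSplit rest
      else match dotSplit rest with
        | p :: ps => (c :: p) :: ps
        | [] => [[c]]

theorem bTicks_len : ∀ cs : List Char, (bTicks cs).2.length ≤ cs.length := by
  intro cs
  induction cs with
  | nil => simp [bTicks]
  | cons c rest ih =>
      by_cases h : c = '`'
      · subst h
        simpa [bTicks] using Nat.le_succ_of_le ih
      · rw [bTicks.eq_def]
        split
        · rename_i heq
          injection heq with h1 h2
          exact absurd h1 h
        · simp

theorem bChunk_len : ∀ cs : List Char, (bChunk cs).2.length ≤ cs.length := by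
  intro cs
  induction cs with
  | nil => simp [bChunk]
  | cons c rest ih =>
      simp only [bChunk]
      split
      · simp
      · simpa using Nat.le_succ_of_le ih

-- B's outer while loop; tok is the concatenation of Python B's fragment list.
def bLoop : List Char → List Char → Bool → List String → List String
  | [], tok, _, parts => if String.ofList tok = "" then parts else parts ++ [String.ofList tok]
  | c :: rest, tok, inq, parts =>
      if c = '`' then
        bLoop (bTicks rest).2 (tok ++ List.replicate (((bTicks rest).1 + 1) / 2) '`')
          (if ((bTicks rest).1 + 1) % 2 = 1 then !inq else inq) parts
      else
        if inq then bLoop (bChunk rest).2 (tok ++ (c :: (bChunk rest).1)) inq parts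
        else
          match dotSplit (c :: (bChunk rest).1) with
          | [] => bLoop (bChunk rest).2 tok inq parts
          | p0 :: ps =>
              let st := ps.foldl (fun (st : List String × List Char) p =>
                (st.1 ++ [String.ofList st.2], p)) (parts, tok ++ p0)
              bLoop (bChunk rest).2 st.2 inq st.1
  termination_by cs => cs.length
  decreasing_by
  · have := bTicks_len rest; simp; omega
  · have := bChunk_len rest; simp; omega
  · have := bChunk_len rest; simp; omega
  · have := bChunk_len rest; simp; omega

def split_fully_qualified_spark_name_alt (qualified_name : Option String) : List String :=
  match qualified_name with
  | none => [""]
  | some s => if s = "``" ∨ s = "" then [""] else bLoop s.toList [] false []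

-- ===== PRECONDITION & SPEC =====
def Spec_split_fully_qualified_spark_name (qualified_name : Option String) (out : List String) : Prop := out = split_fully_qualified_spark_name_alt qualified_name
instance (qualified_name : Option String) (out : List String) : Decidable (Spec_split_fully_qualified_spark_name qualified_name out) := by unfold Spec_split_fully_qualified_spark_name; infer_instance

-- ===== CLAIM (what is proved, stated in full; the proofs are below) =====
def Claim_equal_split_fully_qualified_spark_name : Prop := ∀ (qualified_name : Option String), Dom_split_fully_qualified_spark_name qualified_name → Spec_split_fully_qualified_spark_name qualified_name (split_fully_qualified_spark_name qualified_name)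

-- ===== LEMMAS AND PROOFS =====

theorem bTicks_stop (cs : List Char) (h : cs = [] ∨ cs.head? ≠ some '`') : bTicks cs = (0, cs) := by
  rw [bTicks.eq_def]
  split
  · simp_all
  · rfl

theorem bChunk_decomp : ∀ cs : List Char, (bChunk cs).1 ++ (bChunk cs).2 = cs := by
  intro cs
  induction cs with
  | nil => rfl
  | cons c rest ih =>
      simp only [bChunk]
      split
      · rfl
      · simpa using ih

theorem bChunk_tickfree : ∀ cs : List Char, ∀ x ∈ (bChunk cs).1, x ≠ '`' := by
  intro cs
  induction cs with
  | nil => simp [bChunk]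
  | cons c rest ih =>
      simp only [bChunk]
      split
      · simp
      · rename_i hc
        intro x hx
        rcases List.mem_cons.mp hx with h | h
        · subst h; exact hc
        · exact ih x h

theorem bChunk_rest_head : ∀ cs : List Char, (bChunk cs).2 = [] ∨ (bChunk cs).2.head? = some '`' := by
  intro cs
  induction cs with
  | nil => simp [bChunk]
  | cons c rest ih =>
      simp only [bChunk]
      split
      · rename_i hc; right; simp [hc]
      · exact ih

theorem bChunk_append (ch r : List Char) (hch : ∀ x ∈ ch, x ≠ '`')
    (hr : r = [] ∨ r.head? = some '`') : bChunk (ch ++ r) = (ch, r) := by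
  induction ch with
  | nil =>
      rcases hr with h | h
      · subst h; rfl
      · cases r with
        | nil => rfl
        | cons c r' =>
            simp at h
            subst h
            simp [bChunk]
  | cons d ch' ih =>
      have hd : d ≠ '`' := hch d (List.mem_cons_self)
      have := ih (fun x hx => hch x (List.mem_cons_of_mem d hx))
      simp only [List.cons_append, bChunk, if_neg hd, this]

theorem dotSplit_ne_nil : ∀ cs : List Char, dotSplit cs ≠ [] := by
  intro cs
  induction cs with
  | nil => simp [dotSplit]
  | cons c rest ih =>
      simp only [dotSplit]
      split
      · simp
      · split
        · simp
        · simp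

-- bLoop satisfies A's two-backtick step
theorem bLoop_ticktick (rest tok : List Char) (inq : Bool) (parts : List String) :
    bLoop ('`' :: '`' :: rest) tok inq parts = bLoop rest (tok ++ ['`']) inq parts := by
  by_cases h : rest = [] ∨ rest.head? ≠ some '`'
  · have ht := bTicks_stop rest h
    simp [bLoop, bTicks, ht]
  · rcases rest with _ | ⟨c, rest2⟩
    · exact absurd (Or.inl rfl) h
    · have hc : c = '`' := by
        by_contra hc
        exact h (Or.inr (by simp [hc]))
      subst hc
      have h2 : ((bTicks rest2).1 + 1 + 1 + 1) / 2 = ((bTicks rest2).1 + 1) / 2 + 1 := by omega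
      have h3 : ((bTicks rest2).1 + 1 + 1 + 1) % 2 = ((bTicks rest2).1 + 1) % 2 := by omega
      simp [bLoop, bTicks, h2, h3, List.replicate_succ]

-- bLoop satisfies A's single-backtick (toggle) step
theorem bLoop_tick (rest tok : List Char) (inq : Bool) (parts : List String)
    (h : rest = [] ∨ rest.head? ≠ some '`') :
    bLoop ('`' :: rest) tok inq parts = bLoop rest tok (!inq) parts := by
  have ht := bTicks_stop rest h
  simp [bLoop, ht]

-- quoted-chunk absorption: inside quotes a backtick-free chunk joins the token
theorem bLoop_chunk_true (ch r tok : List Char) (parts : List String)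
    (hch : ∀ x ∈ ch, x ≠ '`') (hr : r = [] ∨ r.head? = some '`') :
    bLoop (ch ++ r) tok true parts = bLoop r (tok ++ ch) true parts := by
  cases ch with
  | nil => simp
  | cons d ch' =>
      have hd : d ≠ '`' := hch d List.mem_cons_self
      have hap := bChunk_append ch' r (fun x hx => hch x (List.mem_cons_of_mem d hx)) hr
      simp [bLoop, hd, hap]

-- unquoted-chunk processing: the dot-split fold fast-forwards bLoop over a chunk
theorem bLoop_chunk_false (ch r tok : List Char) (parts : List String)
    (hch : ∀ x ∈ ch, x ≠ '`') (hr : r = [] ∨ r.head? = some '`') :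
    bLoop (ch ++ r) tok false parts =
      (match dotSplit ch with
       | [] => bLoop r tok false parts
       | p0 :: ps =>
           let st := ps.foldl (fun (st : List String × List Char) p =>
             (st.1 ++ [String.ofList st.2], p)) (parts, tok ++ p0)
           bLoop r st.2 false st.1) := by
  cases ch with
  | nil => simp [dotSplit]
  | cons d ch' =>
      have hd : d ≠ '`' := hch d List.mem_cons_self
      have hap := bChunk_append ch' r (fun x hx => hch x (List.mem_cons_of_mem d hx)) hr
      simp only [List.cons_append, bLoop, if_neg hd, hap, Bool.false_eq_true, if_false]

-- bLoop satisfies A's ordinary-character step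
theorem bLoop_char (c : Char) (rest tok : List Char) (inq : Bool) (parts : List String)
    (hc : c ≠ '`') :
    bLoop (c :: rest) tok inq parts =
      (if c = '.' ∧ inq = false then bLoop rest [] inq (parts ++ [String.ofList tok])
       else bLoop rest (tok ++ [c]) inq parts) := by
  have hdec := bChunk_decomp rest
  have htf := bChunk_tickfree rest
  have hrh := bChunk_rest_head rest
  cases inq with
  | true =>
      rw [if_neg (by simp)]
      conv_rhs => rw [← hdec]
      rw [bLoop_chunk_true _ _ _ _ htf hrh]
      simp [bLoop, hc]
  | false =>
      conv_rhs => rw [← hdec]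
      by_cases hdot : c = '.'
      · subst hdot
        rw [if_pos ⟨rfl, rfl⟩, bLoop_chunk_false _ _ _ _ htf hrh]
        have hne := dotSplit_ne_nil (bChunk rest).1
        simp only [bLoop, if_neg hc, Bool.false_eq_true, if_false, dotSplit, if_pos trivial]
        cases hds : dotSplit (bChunk rest).1 with
        | nil => exact absurd hds hne
        | cons q0 qs => simp [List.foldl_cons]
      · rw [if_neg (by simp [hdot]), bLoop_chunk_false _ _ _ _ htf hrh]
        have hne := dotSplit_ne_nil (bChunk rest).1
        simp only [bLoop, if_neg hc, Bool.false_eq_true, if_false, dotSplit, if_neg hdot]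
        cases hds : dotSplit (bChunk rest).1 with
        | nil => exact absurd hds hne
        | cons q0 qs => simp [List.append_assoc]

theorem aLoop_eq_bLoop : ∀ cs tok inq parts, aLoop cs tok inq parts = bLoop cs tok inq parts := by
  have H : ∀ n (cs : List Char), cs.length ≤ n →
      ∀ tok inq parts, aLoop cs tok inq parts = bLoop cs tok inq parts := by
    intro n
    induction n with
    | zero =>
        intro cs hlen tok inq parts
        have : cs = [] := List.length_eq_zero_iff.mp (Nat.le_zero.mp hlen)
        subst this
        simp [aLoop, bLoop]
    | succ n ih =>
        intro cs hlen tok inq parts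
        rcases cs with _ | ⟨c1, rest1⟩
        · simp [aLoop, bLoop]
        · by_cases h1 : c1 = '`'
          · subst h1
            rcases rest1 with _ | ⟨c2, rest2⟩
            · rw [show aLoop ['`'] tok inq parts = aLoop [] tok (!inq) parts from rfl,
                  bLoop_tick [] tok inq parts (Or.inl rfl), ih [] (by simp)]
            · by_cases h2 : c2 = '`'
              · subst h2
                have hr : rest2.length ≤ n := by simp at hlen; omega
                rw [show aLoop ('`' :: '`' :: rest2) tok inq parts
                      = aLoop rest2 (tok ++ ['`']) inq parts from rfl,
                    bLoop_ticktick, ih rest2 hr]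
              · have hr : (c2 :: rest2).length ≤ n := by simp only [List.length_cons] at hlen ⊢; omega
                rw [aLoop.eq_3 _ _ _ _ (by intro r h; injection h with ha _; exact h2 ha),
                    bLoop_tick _ _ _ _ (Or.inr (by simp [h2])), ih (c2 :: rest2) hr]
          · have hr : rest1.length ≤ n := by simp at hlen; omega
            rw [aLoop.eq_4 _ _ _ _ _ (by intro r hcs; exact absurd hcs h1) h1,
                bLoop_char _ _ _ _ _ h1]
            by_cases hdot : c1 = '.' ∧ inq = false
            · rw [if_pos hdot, if_pos hdot, ih rest1 hr]
            · rw [if_neg hdot, if_neg hdot, ih rest1 hr]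
  intro cs
  exact H cs.length cs le_rfl

-- ===== VERDICT (by name: the statement is the Claim_ definition above) =====
theorem split_fully_qualified_spark_name_spec : Claim_equal_split_fully_qualified_spark_name := by
  intro q _
  unfold Spec_split_fully_qualified_spark_name split_fully_qualified_spark_name split_fully_qualified_spark_name_alt
  cases q with
  | none => rfl
  | some s =>
      by_cases h : s = "``" ∨ s = ""
      · simp [h]
      · simp [h, aLoop_eq_bLoop]
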